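-- pv_equiv track=rewrite | github.com/Sadoyu/Hackerrank | Competitions/Week of Code 36/RevisedRussianRoulette.py | revisedRussianRoulette
-- ===== SOURCE A (Python) =====
-- from typing import List, Tuple
--
-- def revisedRussianRoulette(arr: List[int]) -> Tuple[int, int]:
--     maxi = sum(arr)
--     mini = maxi
--     i = 0
--
--     while i + 1 < len(arr):
--         if arr[i] == 1 and arr[i+1] == 1:
--             mini -= 1
--             i += 1
--         i += 1
--
--     return mini, maxi
-- ===== SOURCE B (Python) =====
-- from typing import List, Tuple
--
-- def revisedRussianRoulette(arr: List[int]) -> Tuple[int, int]: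
--     maxi = sum(arr)
--     mini = maxi
--     run = 0
--     for x in arr:
--         if x == 1:
--             run += 1
--             if run % 2 == 0:
--                 mini -= 1
--         else:
--             run = 0
--     return mini, maxi
-- ===== Notes on version B (the rewrite author's own statement) =====
-- stated objective: alternative
-- what changed: Replaces the index-based greedy lookahead/skip while-loop with a single run-length pass that counts consecutive 1s and decrements mini each time a run reaches even length.
import Mathlib
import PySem

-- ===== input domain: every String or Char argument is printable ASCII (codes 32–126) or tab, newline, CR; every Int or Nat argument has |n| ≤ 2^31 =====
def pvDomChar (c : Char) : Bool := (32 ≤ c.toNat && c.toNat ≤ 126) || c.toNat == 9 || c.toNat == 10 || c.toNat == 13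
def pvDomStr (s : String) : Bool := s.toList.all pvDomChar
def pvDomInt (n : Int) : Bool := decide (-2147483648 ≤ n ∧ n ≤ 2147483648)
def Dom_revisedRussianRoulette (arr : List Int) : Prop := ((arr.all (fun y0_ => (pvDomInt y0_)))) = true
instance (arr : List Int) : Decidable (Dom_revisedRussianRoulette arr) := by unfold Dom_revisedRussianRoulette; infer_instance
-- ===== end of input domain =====

-- B replaces A's index-based greedy lookahead/skip scan by a run-length single pass (alternative decomposition; a timing run measured B faster by a constant factor).


-- ===== PORT A =====
-- A's while loop over index i, transcribed structurally on the suffix arr.drop i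
-- (state mini; 'mini -= 1; i += 2' on a 1-1 pair, else 'i += 1')
def rrLoopA : List Int → Int → Int
  | x :: y :: t, mini => if x = 1 ∧ y = 1 then rrLoopA t (mini - 1) else rrLoopA (y :: t) mini
  | _, mini => mini

def revisedRussianRoulette (arr : List Int) : Int × Int :=
  let maxi := arr.sum
  let mini := rrLoopA arr maxi
  (mini, maxi)

-- ===== PORT B =====
-- one step of B's for-loop: state (mini, run)
def rrStepB (s : Int × Int) (x : Int) : Int × Int :=
  if x = 1 then
    let run := s.2 + 1
    if PySem.Int.mod run 2 = 0 then (s.1 - 1, run) else (s.1, run)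
  else (s.1, 0)

def revisedRussianRoulette_alt (arr : List Int) : Int × Int :=
  let maxi := arr.sum
  let s := arr.foldl rrStepB (maxi, 0)
  (s.1, maxi)

-- ===== PRECONDITION & SPEC =====
def Spec_revisedRussianRoulette (arr : List Int) (out : Int × Int) : Prop := out = revisedRussianRoulette_alt arr
instance (arr : List Int) (out : Int × Int) : Decidable (Spec_revisedRussianRoulette arr out) := by unfold Spec_revisedRussianRoulette; infer_instance

-- ===== CLAIM (what is proved, stated in full; the proofs are below) =====
def Claim_equal_revisedRussianRoulette : Prop := ∀ (arr : List Int), Dom_revisedRussianRoulette arr → Spec_revisedRussianRoulette arr (revisedRussianRoulette arr)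

-- ===== LEMMAS AND PROOFS =====

-- number of non-overlapping adjacent 1-pairs, greedy from the left
def rrPairs : List Int → Int
  | x :: y :: t => if x = 1 ∧ y = 1 then 1 + rrPairs t else rrPairs (y :: t)
  | _ => 0

lemma rrLoopA_eq_pairs (l : List Int) : ∀ (m : Int), rrLoopA l m = m - rrPairs l := by
  induction l using rrPairs.induct with
  | case1 x y t hb ih =>
      intro m
      rw [rrLoopA, if_pos hb, ih, rrPairs, if_pos hb]
      ring
  | case2 x y t hb ih =>
      intro m
      rw [rrLoopA, if_neg hb, ih, rrPairs, if_neg hb]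
  | case3 t h =>
      intro m
      match t, h with
      | [], _ => simp [rrLoopA, rrPairs]
      | [a], _ => simp [rrLoopA, rrPairs]
      | a :: b :: u, h => exact (h a b u rfl).elim

-- the run counter only matters through its parity
lemma rrFoldB_parity (l : List Int) (m : Int) (r r' : Int) (hp : PySem.Int.mod r 2 = PySem.Int.mod r' 2) :
    (l.foldl rrStepB (m, r)).1 = (l.foldl rrStepB (m, r')).1 := by
  induction l generalizing m r r' with
  | nil => rfl
  | cons x t ih =>
      simp only [List.foldl_cons, rrStepB]
      by_cases hx : x = 1
      · have hp1 : PySem.Int.mod (r + 1) 2 = PySem.Int.mod (r' + 1) 2 := by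
          simp [PySem.Int.mod, Int.fmod_eq_emod] at hp ⊢; omega
        simp only [if_pos hx, hp1]
        by_cases he : PySem.Int.mod (r' + 1) 2 = 0
        · simp only [if_pos he]; exact ih _ _ _ hp1
        · simp only [if_neg he]; exact ih _ _ _ hp1
      · simp only [if_neg hx]

lemma rrStep_one_even (m r : Int) (h : PySem.Int.mod (r + 1) 2 = 0) :
    rrStepB (m, r) 1 = (m - 1, r + 1) := by
  unfold rrStepB; rw [if_pos rfl]; dsimp only; rw [if_pos h]

lemma rrStep_one_odd (m r : Int) (h : ¬ PySem.Int.mod (r + 1) 2 = 0) :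
    rrStepB (m, r) 1 = (m, r + 1) := by
  unfold rrStepB; rw [if_pos rfl]; dsimp only; rw [if_neg h]

lemma rrStep_other (m r x : Int) (h : x ≠ 1) : rrStepB (m, r) x = (m, 0) := by
  unfold rrStepB; rw [if_neg h]

lemma rrFoldB_eq_pairs (l : List Int) : ∀ (m : Int),
    (l.foldl rrStepB (m, 0)).1 = m - rrPairs l := by
  induction l using rrPairs.induct with
  | case1 x y t hb ih =>
      intro m
      obtain ⟨hx, hy⟩ := hb
      subst hx; subst hy
      rw [List.foldl_cons, rrStep_one_odd m 0 (by decide)]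
      simp only [zero_add]
      rw [List.foldl_cons, rrStep_one_even m 1 (by decide),
          rrFoldB_parity t (m - 1) (1 + 1) 0 (by decide), ih]
      simp [rrPairs]
      ring
  | case2 x y t hb ih =>
      intro m
      by_cases hx : x = 1
      · have hy : y ≠ 1 := fun hy => hb ⟨hx, hy⟩
        subst hx
        rw [List.foldl_cons, rrStep_one_odd m 0 (by decide)]
        simp only [zero_add]
        rw [List.foldl_cons, rrStep_other m 1 y hy]
        have := ih m
        rw [List.foldl_cons, rrStep_other m 0 y hy] at this
        rw [this]
        simp [rrPairs, hy]
      · rw [List.foldl_cons, rrStep_other m 0 x hx, ih]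
        simp [rrPairs, hb]
  | case3 t h =>
      intro m
      match t, h with
      | [], _ => simp [rrPairs]
      | [a], _ =>
          by_cases ha : a = 1
          · subst ha
            rw [List.foldl_cons, rrStep_one_odd m 0 (by decide)]
            simp [rrPairs]
          · rw [List.foldl_cons, rrStep_other m 0 a ha]
            simp [rrPairs]
      | a :: b :: u, h => exact (h a b u rfl).elim

-- ===== VERDICT (by name: the statement is the Claim_ definition above) =====
theorem revisedRussianRoulette_spec : Claim_equal_revisedRussianRoulette := by
  intro arr _
  unfold Spec_revisedRussianRoulette revisedRussianRoulette revisedRussianRoulette_alt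
  simp only
  rw [rrLoopA_eq_pairs, rrFoldB_eq_pairs]
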